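-- pv_equiv track=rewrite | github.com/rodis120/clique-cover | algorithms/greedy/greedy.py | greedy_clique_cover
-- ===== SOURCE A (Python) =====
-- def is_clique(vertices, adj_mat):
--     for i in vertices:
--         for j in vertices:
--             if i != j and not adj_mat[i][j]:
--                 return False
--     return True
--
-- def greedy_clique_cover(adj_mat):
--     n = len(adj_mat)
--     vertices = list(range(n))
--     uncovered = set(vertices)
--     cliques = []
--
--     while uncovered:
--         current_clique = []
--         for v in list(uncovered):
--             if is_clique(current_clique + [v], adj_mat):
--                 current_clique.append(v)
--                 uncovered.remove(v)
--         cliques.append(current_clique)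
--
--     return cliques
-- ===== SOURCE B (Python) =====
-- def greedy_clique_cover(adj_mat):
--     n = len(adj_mat)
--     cliques = []
--     for v in range(n):
--         for c in cliques:
--             if all(adj_mat[u][v] for u in c) and all(adj_mat[v][u] for u in c):
--                 c.append(v)
--                 break
--         else:
--             cliques.append([v])
--     return cliques
-- ===== Notes on version B (the rewrite author's own statement) =====
-- stated objective: faster
-- what changed: A repeatedly sweeps the uncovered vertices, one full pass per clique, re-verifying every pair of the growing clique via is_clique; B makes a single first-fit pass over the vertices, testing each vertex only against the members of each existing clique (both edge directions), which yields the identical cover.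
-- outside the precondition, e.g. on greedy_clique_cover([[]]): A returns [[0]], B returns [[0]]
import Mathlib
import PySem

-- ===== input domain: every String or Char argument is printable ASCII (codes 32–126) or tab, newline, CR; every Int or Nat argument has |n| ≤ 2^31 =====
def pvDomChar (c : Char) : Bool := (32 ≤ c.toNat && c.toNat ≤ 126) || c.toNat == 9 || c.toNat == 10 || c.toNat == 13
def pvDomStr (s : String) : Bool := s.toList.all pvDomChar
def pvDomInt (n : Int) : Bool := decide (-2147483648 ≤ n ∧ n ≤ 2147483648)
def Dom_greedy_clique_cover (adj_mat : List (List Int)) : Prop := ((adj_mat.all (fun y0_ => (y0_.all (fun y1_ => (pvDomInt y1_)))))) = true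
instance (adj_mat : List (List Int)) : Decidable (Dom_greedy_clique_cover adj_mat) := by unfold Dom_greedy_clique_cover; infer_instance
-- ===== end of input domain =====

-- B replaces A's repeated full passes (each re-verifying whole cliques pairwise) with a single
-- first-fit pass checking each vertex only against existing clique members; measurably faster.

-- adj_mat[i][j]; in range for every access under Pre_ (square matrix), default never used there
def pvGet (adj : List (List Int)) (i j : Int) : Int :=
  (((PySem.List.pyGet? adj i).bind (fun row => PySem.List.pyGet? row j)).getD 0)

-- ===== PORT A =====
def is_clique (vertices : List Int) (adj_mat : List (List Int)) : Bool :=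
  vertices.all (fun i => vertices.all (fun j => !(decide (i ≠ j) && (pvGet adj_mat i j == 0))))

-- one pass of A's while-body: (current_clique, still-uncovered) over the uncovered snapshot
def passA (adj : List (List Int)) (st : List Int × List Int) (vs : List Int) : List Int × List Int :=
  vs.foldl (fun st v =>
    if is_clique (st.1 ++ [v]) adj then (st.1 ++ [v], st.2) else (st.1, st.2 ++ [v])) st

-- A's while loop; fuel bounds the passes (each pass covers ≥ 1 vertex, so uncovered.length suffices)
def loopA (adj : List (List Int)) : Nat → List Int → List (List Int)
  | 0, _ => []
  | fuel + 1, uncovered =>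
    if uncovered.isEmpty then []
    else
      let st := passA adj ([], []) uncovered
      st.1 :: loopA adj fuel st.2

def greedy_clique_cover (adj_mat : List (List Int)) : List (List Int) :=
  let vertices := PySem.List.pyRange 0 adj_mat.length 1
  loopA adj_mat vertices.length vertices

-- ===== PORT B =====
def fitsB (adj : List (List Int)) (c : List Int) (v : Int) : Bool :=
  c.all (fun u => !(pvGet adj u v == 0)) && c.all (fun u => !(pvGet adj v u == 0))

-- the inner for-else: put v into the first clique it fits, else open a new one
def placeB (adj : List (List Int)) (v : Int) : List (List Int) → List (List Int)
  | [] => [[v]]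
  | c :: cs => if fitsB adj c v then (c ++ [v]) :: cs else c :: placeB adj v cs

def greedy_clique_cover_alt (adj_mat : List (List Int)) : List (List Int) :=
  (PySem.List.pyRange 0 adj_mat.length 1).foldl (fun cliques v => placeB adj_mat v cliques) []

-- ===== PRECONDITION & SPEC =====
-- Pre_ : every row reaches at least n = len(adj_mat) entries, so every access adj_mat[i][j]
-- (i, j < n) is in range. With a row shorter than n, A raises IndexError, except on degenerate
-- inputs where the greedy run never consults an out-of-range entry (e.g. [[]]), where A and B agree anyway.
def Pre_greedy_clique_cover (adj_mat : List (List Int)) : Prop :=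
  ∀ row ∈ adj_mat, adj_mat.length ≤ row.length
instance (adj_mat : List (List Int)) : Decidable (Pre_greedy_clique_cover adj_mat) := by
  unfold Pre_greedy_clique_cover; infer_instance
def pvWitness_greedy_clique_cover : List (List Int) := [[0, 1, 0], [1, 0, 0], [0, 0, 0]]

def Spec_greedy_clique_cover (adj_mat : List (List Int)) (out : List (List Int)) : Prop := out = greedy_clique_cover_alt adj_mat
instance (adj_mat : List (List Int)) (out : List (List Int)) : Decidable (Spec_greedy_clique_cover adj_mat out) := by unfold Spec_greedy_clique_cover; infer_instance

-- ===== CLAIM (what is proved, stated in full; the proofs are below) =====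
def Claim_equal_greedy_clique_cover : Prop := ∀ (adj_mat : List (List Int)), Dom_greedy_clique_cover adj_mat → Pre_greedy_clique_cover adj_mat → Spec_greedy_clique_cover adj_mat (greedy_clique_cover adj_mat)

-- ===== LEMMAS AND PROOFS =====

-- one pass of B's greedy test, phrased with fitsB
def passF (adj : List (List Int)) (st : List Int × List Int) (vs : List Int) : List Int × List Int :=
  vs.foldl (fun st v =>
    if fitsB adj st.1 v then (st.1 ++ [v], st.2) else (st.1, st.2 ++ [v])) st

def ffFold (adj : List (List Int)) (acc : List (List Int)) (vs : List Int) : List (List Int) :=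
  vs.foldl (fun cliques v => placeB adj v cliques) acc

theorem passF_cons (adj : List (List Int)) (c r : List Int) (v : Int) (vs : List Int) :
    passF adj (c, r) (v :: vs) =
      if fitsB adj c v then passF adj (c ++ [v], r) vs else passF adj (c, r ++ [v]) vs := by
  by_cases h : fitsB adj c v = true <;> simp [passF, h]

theorem passA_cons (adj : List (List Int)) (c r : List Int) (v : Int) (vs : List Int) :
    passA adj (c, r) (v :: vs) =
      if is_clique (c ++ [v]) adj then passA adj (c ++ [v], r) vs else passA adj (c, r ++ [v]) vs := by
  by_cases h : is_clique (c ++ [v]) adj = true <;> simp [passA, h]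

theorem ffFold_step (adj : List (List Int)) (acc : List (List Int)) (v : Int) (vs : List Int) :
    ffFold adj acc (v :: vs) = ffFold adj (placeB adj v acc) vs := rfl

theorem fitsB_nil (adj : List (List Int)) (v : Int) : fitsB adj [] v = true := rfl

theorem is_clique_snoc (adj : List (List Int)) (c : List Int) (v : Int) (hv : v ∉ c) :
    is_clique (c ++ [v]) adj = (is_clique c adj && fitsB adj c v) := by
  rw [Bool.eq_iff_iff]
  simp only [is_clique, fitsB, List.all_append, List.all_cons, List.all_nil, List.all_eq_true,
    Bool.and_eq_true, Bool.not_eq_true', Bool.and_eq_false_iff, decide_eq_false_iff_not,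
    not_not, beq_eq_false_iff_ne, ne_eq, and_true, true_or, not_true, not_false_iff]
  constructor
  · rintro ⟨h1, h2⟩
    refine ⟨fun i hi => (h1 i hi).1, fun u hu => ?_, fun u hu => ?_⟩
    · rcases (h1 u hu).2 with h | h
      · exact absurd (h ▸ hu) hv
      · exact h
    · rcases h2 u hu with h | h
      · exact absurd (h.symm ▸ hu) hv
      · exact h
  · rintro ⟨h1, h2, h3⟩
    exact ⟨fun i hi => ⟨h1 i hi, Or.inr (h2 i hi)⟩, fun u hu => Or.inr (h3 u hu)⟩

-- the second state component is only accumulated, never read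
theorem passF_acc (adj : List (List Int)) (vs : List Int) :
    ∀ c r, passF adj (c, r) vs = ((passF adj (c, []) vs).1, r ++ (passF adj (c, []) vs).2) := by
  induction vs with
  | nil => intro c r; simp [passF]
  | cons v vs ih =>
    intro c r
    rw [passF_cons, passF_cons]
    by_cases h : fitsB adj c v = true
    · rw [if_pos h, if_pos h]
      exact ih (c ++ [v]) r
    · rw [if_neg h, if_neg h, ih c (r ++ [v]), ih c ([] ++ [v])]
      simp [List.append_assoc]

theorem passF_rest_sublist (adj : List (List Int)) (vs : List Int) :
    ∀ c, (passF adj (c, []) vs).2.Sublist vs := by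
  induction vs with
  | nil => intro c; simp [passF]
  | cons v vs ih =>
    intro c
    rw [passF_cons]
    by_cases h : fitsB adj c v = true
    · rw [if_pos h]
      exact (ih (c ++ [v])).trans (List.sublist_cons_self v vs)
    · rw [if_neg h, passF_acc adj vs c ([] ++ [v])]
      simpa using List.Sublist.cons₂ v (ih c)

-- A's pass equals the fitsB pass whenever the accumulated clique really is a clique
theorem passA_eq_passF (adj : List (List Int)) (vs : List Int) :
    ∀ c r, is_clique c adj = true → (∀ v ∈ vs, v ∉ c) → vs.Nodup →
      passA adj (c, r) vs = passF adj (c, r) vs := by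
  induction vs with
  | nil => intro c r _ _ _; rfl
  | cons v vs ih =>
    intro c r hc hmem hnd
    have hvnc : v ∉ c := hmem v (List.mem_cons_self ..)
    have hkey : is_clique (c ++ [v]) adj = (is_clique c adj && fitsB adj c v) :=
      is_clique_snoc adj c v hvnc
    rw [passA_cons, passF_cons]
    rw [List.nodup_cons] at hnd
    by_cases h : fitsB adj c v = true
    · rw [if_pos (by rw [hkey, hc, h]; rfl), if_pos h]
      exact ih (c ++ [v]) r (by rw [hkey, hc, h]; rfl)
        (fun u hu => by
          simp only [List.mem_append, List.mem_singleton]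
          rintro (h1 | h1)
          · exact hmem u (List.mem_cons_of_mem v hu) h1
          · exact hnd.1 (h1 ▸ hu))
        hnd.2
    · rw [if_neg (by rw [hkey, hc]; simpa using h), if_neg h]
      exact ih c (r ++ [v]) hc (fun u hu => hmem u (List.mem_cons_of_mem v hu)) hnd.2

-- first-fit with a nonempty accumulator: its head clique is exactly one fitsB pass
theorem ffFold_cons (adj : List (List Int)) (vs : List Int) :
    ∀ c cs, ffFold adj (c :: cs) vs =
      (passF adj (c, []) vs).1 :: ffFold adj cs (passF adj (c, []) vs).2 := by
  induction vs with
  | nil => intro c cs; simp [ffFold, passF]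
  | cons v vs ih =>
    intro c cs
    rw [ffFold_step, passF_cons]
    by_cases h : fitsB adj c v = true
    · rw [if_pos h]
      have hp : placeB adj v (c :: cs) = (c ++ [v]) :: cs := by simp [placeB, h]
      rw [hp]
      exact ih (c ++ [v]) cs
    · rw [if_neg h]
      have hp : placeB adj v (c :: cs) = c :: placeB adj v cs := by simp [placeB, h]
      rw [hp, ih c (placeB adj v cs), passF_acc adj vs c ([] ++ [v])]
      simp only [List.nil_append, List.singleton_append]
      rfl

theorem loopA_step (adj : List (List Int)) (fuel : Nat) (v : Int) (vs : List Int) :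
    loopA adj (fuel + 1) (v :: vs) =
      (passA adj ([], []) (v :: vs)).1 :: loopA adj fuel (passA adj ([], []) (v :: vs)).2 := by
  simp [loopA]

theorem loopA_eq_ffFold (adj : List (List Int)) :
    ∀ fuel vs, vs.length ≤ fuel → vs.Nodup → loopA adj fuel vs = ffFold adj [] vs := by
  intro fuel
  induction fuel with
  | zero =>
    intro vs hlen _
    rw [List.length_eq_zero_iff.mp (Nat.le_zero.mp hlen)]
    rfl
  | succ fuel ih =>
    intro vs hlen hnd
    cases vs with
    | nil => rfl
    | cons v vs' =>
      have hA : passA adj ([], []) (v :: vs') = passF adj ([], []) (v :: vs') :=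
        passA_eq_passF adj (v :: vs') [] [] rfl (by simp) hnd
      have hstep : passF adj ([], []) (v :: vs') = passF adj ([v], []) vs' := by
        rw [passF_cons, if_pos (fitsB_nil adj v), List.nil_append]
      have hrest : (passF adj ([v], []) vs').2.Sublist vs' := passF_rest_sublist adj vs' [v]
      have hff : ffFold adj [] (v :: vs') =
          (passF adj ([v], []) vs').1 :: ffFold adj [] (passF adj ([v], []) vs').2 := by
        rw [ffFold_step]
        exact ffFold_cons adj vs' [v] []
      rw [loopA_step, hA, hstep, hff]
      rw [List.nodup_cons] at hnd
      congr 1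
      exact ih _ (le_trans hrest.length_le (Nat.succ_le_succ_iff.mp (by simpa using hlen))) (hrest.nodup hnd.2)

-- ===== VERDICT (by name: the statement is the Claim_ definition above) =====
theorem greedy_clique_cover_spec : Claim_equal_greedy_clique_cover := by
  intro adj _ _
  unfold Spec_greedy_clique_cover greedy_clique_cover greedy_clique_cover_alt
  exact loopA_eq_ffFold adj _ _ le_rfl (PySem.List.nodup_pyRange_one 0 adj.length)
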